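-- pv_equiv track=rewrite | github.com/astronomy-commons/lsd2 | hipscat/util.py | cmd_rename_kws
-- ===== SOURCE A (Python) =====
-- def cmd_rename_kws(cols, md, suffix='_2'):
--     '''
--         updates the metadata dictionary kw's to reflect same column names
--         if there is a column name with an _2 suffix,
--         then make the metadata kw params reflect that as well
--     '''
--     for c in cols:
--         if str(c).endswith(suffix):
--             cmod = c.split(suffix)[0]
--             if cmod == md['ra_kw']:
--                 md['ra_kw'] = c
--             if cmod == md['dec_kw']:
--                 md['dec_kw'] = c
--             if cmod == md['id_kw']:
--                 md['id_kw'] = c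
--     return md
-- ===== SOURCE B (Python) =====
-- def cmd_rename_kws(cols, md, suffix='_2'):
--     '''Per-key scan: for each metadata key, take the FIRST column that ends
--     with the suffix and whose stripped name equals the current value.'''
--     for key in ('ra_kw', 'dec_kw', 'id_kw'):
--         if key not in md:
--             continue
--         base = md[key]
--         new = next((c for c in cols if c.endswith(suffix) and c.split(suffix)[0] == base), None)
--         if new is not None:
--             md[key] = new
--     return md
-- ===== Notes on version B (the rewrite author's own statement) =====
-- stated objective: simpler
-- what changed: Instead of one pass over all columns updating the three metadata keys against the evolving dict, B loops over the three keys and for each takes the FIRST matching column, stopping that key's scan early (equivalent because a stripped column name never contains the suffix and so can never equal an already-renamed value).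
import Mathlib
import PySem

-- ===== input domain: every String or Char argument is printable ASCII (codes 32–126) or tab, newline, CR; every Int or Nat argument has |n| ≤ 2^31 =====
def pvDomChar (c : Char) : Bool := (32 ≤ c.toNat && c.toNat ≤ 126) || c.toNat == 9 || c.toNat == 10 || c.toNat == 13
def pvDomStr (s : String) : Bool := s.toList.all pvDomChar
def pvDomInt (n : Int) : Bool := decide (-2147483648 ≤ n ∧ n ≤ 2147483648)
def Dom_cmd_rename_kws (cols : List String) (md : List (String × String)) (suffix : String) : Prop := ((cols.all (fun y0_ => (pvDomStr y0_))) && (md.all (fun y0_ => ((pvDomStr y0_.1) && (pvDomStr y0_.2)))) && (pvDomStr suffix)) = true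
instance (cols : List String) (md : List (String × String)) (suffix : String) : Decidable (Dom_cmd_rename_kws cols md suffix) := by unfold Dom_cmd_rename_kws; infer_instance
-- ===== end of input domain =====

-- B replaces A's single column pass that mutates all three keys against the evolving dict by a
-- per-key scan taking the first matching column (objective: simpler); both mutate md in Python,
-- identically on Pre_, and the theorems below are about the returned dict.

-- ===== PORT A =====
-- c.split(suffix)[0] (suffix ≠ "": split is nonempty, so [0] is its head; suffix = "" raises, excluded by Pre_)
def pvStrip (c suffix : String) : String := (((PySem.Str.split? c suffix).getD []).headD "")

-- one 'if cmod == md[k]: md[k] = c' statement; the none branch is Python's KeyError, excluded by Pre_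
def pvUpdA (k : String) (cmod c : String) (d : PySem.Dict String String) : PySem.Dict String String :=
  match d.get? k with
  | some v => if cmod == v then d.insert k c else d
  | none => d

-- the body of A's 'for c in cols' loop
def pvStepA (suffix : String) (d : PySem.Dict String String) (c : String) : PySem.Dict String String :=
  if PySem.Str.endswith c suffix then
    pvUpdA "id_kw" (pvStrip c suffix) c
      (pvUpdA "dec_kw" (pvStrip c suffix) c (pvUpdA "ra_kw" (pvStrip c suffix) c d))
  else d

def cmd_rename_kws (cols : List String) (md : List (String × String)) (suffix : String) : List (String × String) :=
  (cols.foldl (pvStepA suffix) (PySem.Dict.mk md)).items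

-- ===== PORT B =====
-- next((c for c in cols if c.endswith(suffix) and c.split(suffix)[0] == base), None)
def pvFind (cols : List String) (suffix v : String) : Option String :=
  cols.find? (fun c => PySem.Str.endswith c suffix && (pvStrip c suffix == v))

-- the body of B's 'for key in (...)' loop ('continue' when the key is absent)
def pvStepB (cols : List String) (suffix : String) (d : PySem.Dict String String) (k : String) : PySem.Dict String String :=
  match d.get? k with
  | none => d
  | some base =>
    match pvFind cols suffix base with
    | some c => d.insert k c
    | none => d

def cmd_rename_kws_alt (cols : List String) (md : List (String × String)) (suffix : String) : List (String × String) :=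
  (["ra_kw", "dec_kw", "id_kw"].foldl (pvStepB cols suffix) (PySem.Dict.mk md)).items

-- ===== PRECONDITION & SPEC =====
-- Pre_ is exactly A's returning set: as soon as some column ends with the suffix, A raises
-- ValueError on an empty suffix (c.split('')) and KeyError if md lacks any of the three keys.
def Pre_cmd_rename_kws (cols : List String) (md : List (String × String)) (suffix : String) : Prop :=
  (∃ c ∈ cols, PySem.Str.endswith c suffix = true) →
    (suffix ≠ "" ∧ ((PySem.Dict.mk md).get? "ra_kw").isSome = true ∧
      ((PySem.Dict.mk md).get? "dec_kw").isSome = true ∧ ((PySem.Dict.mk md).get? "id_kw").isSome = true)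
instance (cols : List String) (md : List (String × String)) (suffix : String) : Decidable (Pre_cmd_rename_kws cols md suffix) := by unfold Pre_cmd_rename_kws; infer_instance

def pvWitness_cmd_rename_kws : List String × (List (String × String)) × String :=
  (["x_2"], ([("ra_kw", "x"), ("dec_kw", "d"), ("id_kw", "i")], "_2"))

def Spec_cmd_rename_kws (cols : List String) (md : List (String × String)) (suffix : String) (out : List (String × String)) : Prop := out = cmd_rename_kws_alt cols md suffix
instance (cols : List String) (md : List (String × String)) (suffix : String) (out : List (String × String)) : Decidable (Spec_cmd_rename_kws cols md suffix out) := by unfold Spec_cmd_rename_kws; infer_instance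

-- ===== CLAIM (what is proved, stated in full; the proofs are below) =====
def Claim_equal_cmd_rename_kws : Prop := ∀ (cols : List String) (md : List (String × String)) (suffix : String), Dom_cmd_rename_kws cols md suffix → Pre_cmd_rename_kws cols md suffix → Spec_cmd_rename_kws cols md suffix (cmd_rename_kws cols md suffix)

-- ===== LEMMAS AND PROOFS =====

-- no occurrence of sep inside the chars scanned so far means sep is not an infix of the current part
lemma pv_cur_clean (sep cur l : List Char) (hsep : sep ≠ [])
    (h : ∀ j, j < cur.length → ¬ sep <+: ((cur.reverse ++ l).drop j)) : ¬ sep <:+: cur.reverse := by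
  rintro ⟨pre, post, hps⟩
  have hsl : 0 < sep.length := List.length_pos_of_ne_nil hsep
  have hlen : pre.length + (sep.length + post.length) = cur.length := by
    have := congrArg List.length hps
    simpa [List.length_append] using this
  have hj : pre.length < cur.length := by omega
  apply h pre.length hj
  have h1 : (cur.reverse).drop pre.length = sep ++ post := by
    rw [← hps, List.append_assoc, List.drop_left]
  have h2 : (cur.reverse ++ l).drop pre.length = (sep ++ post) ++ l := by
    rw [← h1, List.drop_append_of_le_length (by simpa using hj.le)]
  rw [h2, List.append_assoc]
  exact ⟨post ++ l, rfl⟩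

-- every part emitted by Python's split scanner is sep-free
lemma pv_go_clean (sep : List Char) (hsep : sep ≠ []) :
    ∀ (fuel : Nat) (l cur : List Char) (acc : List (List Char)),
      l.length < fuel →
      (∀ j, j < cur.length → ¬ sep <+: ((cur.reverse ++ l).drop j)) →
      (∀ p ∈ acc, ¬ sep <:+: p) →
      ∀ p ∈ PySem.Chars.splitOn.go sep fuel l cur acc, ¬ sep <:+: p := by
  intro fuel
  induction fuel with
  | zero => intro l cur acc hlen; omega
  | succ n ih =>
    intro l cur acc hlen hcur hacc p hp
    cases l with
    | nil =>
      simp [PySem.Chars.splitOn.go] at hp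
      rcases hp with hp | hp
      · exact hacc p hp
      · exact hp ▸ pv_cur_clean sep cur [] hsep hcur
    | cons c rest =>
      rw [show PySem.Chars.splitOn.go sep (n+1) (c :: rest) cur acc =
          (if sep.isPrefixOf (c :: rest) = true then
            PySem.Chars.splitOn.go sep n ((c :: rest).drop sep.length) [] (cur.reverse :: acc)
          else PySem.Chars.splitOn.go sep n rest (c :: cur) acc) from rfl] at hp
      have hsl : 0 < sep.length := List.length_pos_of_ne_nil hsep
      by_cases hpre : sep.isPrefixOf (c :: rest) = true
      · rw [if_pos hpre] at hp
        refine ih ((c :: rest).drop sep.length) [] (cur.reverse :: acc) ?_ (by simp) ?_ p hp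
        · simp only [List.length_drop, List.length_cons] at *
          omega
        · intro q hq
          rcases List.mem_cons.mp hq with hq | hq
          · exact hq ▸ pv_cur_clean sep cur (c :: rest) hsep hcur
          · exact hacc q hq
      · rw [if_neg hpre] at hp
        refine ih rest (c :: cur) acc (by simp at hlen ⊢; omega) ?_ hacc p hp
        intro j hj
        have heq : (c :: cur).reverse ++ rest = cur.reverse ++ (c :: rest) := by simp
        rw [heq]
        simp only [List.length_cons] at hj
        by_cases hjc : j < cur.length
        · exact hcur j hjc
        · have hje : j = cur.length := by omega
          subst hje
          rw [show (cur.reverse ++ (c :: rest)).drop cur.length = c :: rest by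
            rw [show cur.length = cur.reverse.length by simp]; exact List.drop_left]
          intro hcontra
          exact hpre (List.isPrefixOf_iff_prefix.mpr hcontra)

lemma pv_splitOn_clean (s sep : List Char) (hsep : sep ≠ []) :
    ∀ p ∈ PySem.Chars.splitOn s sep, ¬ sep <:+: p := by
  intro p hp
  exact pv_go_clean sep hsep (s.length + 1) s [] [] (by omega) (by simp) (by simp) p hp

-- the stripped name c.split(suffix)[0] never equals a string ending with the (nonempty) suffix
lemma pv_strip_ne (c suffix v : String) (hsuf : suffix ≠ "")
    (hv : PySem.Str.endswith v suffix = true) : pvStrip c suffix ≠ v := by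
  have hsepl : suffix.toList ≠ [] := by simpa using hsuf
  have hvs : suffix.toList <:+: v.toList :=
    ((PySem.Chars.endswith_iff _ _).mp (by rw [← PySem.Str.endswith_eq]; exact hv)).isInfix
  intro heq
  have hclean : ¬ suffix.toList <:+: (pvStrip c suffix).toList := by
    unfold pvStrip
    rw [show PySem.Str.split? c suffix =
        some ((PySem.Chars.splitOn c.toList suffix.toList).map String.ofList) by
      unfold PySem.Str.split? PySem.Chars.split?
      simp [hsepl]]
    cases hparts : PySem.Chars.splitOn c.toList suffix.toList with
    | nil =>
      intro hcontra
      simp only [List.map_nil, List.headD_nil, Option.getD_some] at hcontra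
      have : suffix.toList <:+: ([] : List Char) := by simpa using hcontra
      exact hsepl (List.eq_nil_of_infix_nil this)
    | cons p ps =>
      simp only [List.map_cons, List.headD_cons, Option.getD_some, String.toList_ofList]
      exact pv_splitOn_clean c.toList suffix.toList hsepl p (by rw [hparts]; exact List.mem_cons_self ..)
  rw [heq] at hclean
  exact hclean hvs

-- no column is ever renamed twice: find never matches an already-suffixed value
lemma pvFind_none (cols : List String) (suffix v : String) (hsuf : suffix ≠ "")
    (hv : PySem.Str.endswith v suffix = true) : pvFind cols suffix v = none := by
  rw [pvFind, List.find?_eq_none]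
  intro c _
  simp only [Bool.and_eq_true, beq_iff_eq, not_and]
  intro _ heq
  exact pv_strip_ne c suffix v hsuf hv heq

-- ---- dictionary bookkeeping ----

lemma pv_get?_contains {d : PySem.Dict String String} {k : String} {v : String}
    (h : d.get? k = some v) : d.contains k = true := by
  unfold PySem.Dict.get? at h
  unfold PySem.Dict.contains
  cases hf : d.items.find? (fun p => p.1 == k) with
  | none => rw [hf] at h; simp at h
  | some p =>
    have hpk := List.find?_some hf
    have hm := List.mem_of_find?_eq_some hf
    rw [List.any_eq_true]
    exact ⟨p, hm, hpk⟩

lemma pv_contains_insert {d : PySem.Dict String String} {k : String} (k' : String) (v : String)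
    (h : d.contains k = true) : (d.insert k' v).contains k = true := by
  unfold PySem.Dict.insert
  by_cases hc : d.contains k' = true
  · rw [if_pos hc]
    unfold PySem.Dict.contains at h ⊢
    rw [List.any_eq_true] at h ⊢
    obtain ⟨p, hp, hpk⟩ := h
    refine ⟨if (p.1 == k') = true then (k', v) else p, List.mem_map_of_mem hp, ?_⟩
    split
    · next hpk' => simp_all
    · exact hpk
  · rw [if_neg hc]
    unfold PySem.Dict.contains at h ⊢
    rw [List.any_eq_true] at h ⊢
    obtain ⟨p, hp, hpk⟩ := h
    exact ⟨p, List.mem_append_left _ hp, hpk⟩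

-- an insert on a present key leaves the key set unchanged
lemma pv_contains_map (d : PySem.Dict String String) (k : String) (v : String) (k' : String) :
    (PySem.Dict.mk (d.items.map fun p => if (p.1 == k) = true then (k, v) else p)).contains k'
      = d.contains k' := by
  unfold PySem.Dict.contains
  rw [List.any_map]
  congr 1
  funext p
  simp only [Function.comp_apply]
  by_cases hpk : p.1 = k
  · subst hpk; simp
  · simp [hpk]

lemma pv_insert_comm (d : PySem.Dict String String) (k k' : String) (v v' : String)
    (hne : k ≠ k') (hk : d.contains k = true) (hk' : d.contains k' = true) :
    (d.insert k v).insert k' v' = (d.insert k' v').insert k v := by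
  unfold PySem.Dict.insert
  rw [if_pos hk, if_pos hk']
  rw [if_pos (by rw [pv_contains_map]; exact hk')]
  rw [if_pos (by rw [pv_contains_map]; exact hk)]
  apply PySem.Dict.ext
  show List.map _ (List.map _ d.items) = List.map _ (List.map _ d.items)
  rw [List.map_map, List.map_map]
  apply List.map_congr_left
  intro p _
  simp only [Function.comp_apply]
  by_cases hpk : p.1 = k
  · subst hpk
    simp [hne]
  · by_cases hpk' : p.1 = k'
    · subst hpk'
      simp [Ne.symm hne]
    · simp [hpk, hpk']

-- apply an optional rename to one key
def pvApp (k : String) (o : Option String) (d : PySem.Dict String String) : PySem.Dict String String :=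
  match o with
  | some c => d.insert k c
  | none => d

lemma pv_get?_pvApp_of_ne (k k' : String) (o : Option String) (d : PySem.Dict String String)
    (hne : k' ≠ k) : (pvApp k o d).get? k' = d.get? k' := by
  cases o with
  | none => rfl
  | some c => exact PySem.Dict.get?_insert_of_ne d c hne

lemma pv_get?_pvApp_self (k : String) (o : Option String) (d : PySem.Dict String String) (v : String)
    (h : d.get? k = some v) : (pvApp k o d).get? k = some (o.getD v) := by
  cases o with
  | none => simpa using h
  | some c => exact PySem.Dict.get?_insert_self d k c

lemma pv_contains_pvApp (k k' : String) (o : Option String) (d : PySem.Dict String String)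
    (h : d.contains k' = true) : (pvApp k o d).contains k' = true := by
  cases o with
  | none => exact h
  | some c => exact pv_contains_insert k c h

lemma pv_pvApp_comm (k k' : String) (o o' : Option String) (d : PySem.Dict String String)
    (hne : k ≠ k') (hk : d.contains k = true) (hk' : d.contains k' = true) :
    pvApp k o (pvApp k' o' d) = pvApp k' o' (pvApp k o d) := by
  cases o with
  | none => rfl
  | some c =>
    cases o' with
    | none => rfl
    | some c' =>
      show (d.insert k' c').insert k c = (d.insert k c).insert k' c'
      exact (pv_insert_comm d k k' c c' hne hk hk').symm

-- 'o then X' collapses to the single rename 'Y'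
def pvRel (o X Y : Option String) : Prop :=
  (∃ c, o = some c ∧ X = none ∧ Y = some c) ∨ (o = none ∧ X = Y)

lemma pv_pvApp_absorb (k : String) (o X Y : Option String) (d : PySem.Dict String String)
    (h : pvRel o X Y) : pvApp k X (pvApp k o d) = pvApp k Y d := by
  rcases h with ⟨c, ho, hX, hY⟩ | ⟨ho, hXY⟩
  · subst ho; subst hX; subst hY; rfl
  · subst ho; subst hXY; rfl

-- one matching column's triple update followed by the tail's three renames collapses
-- to the three full-list renames
lemma pv_chain (d : PySem.Dict String String) (o1 o2 o3 X1 X2 X3 Y1 Y2 Y3 : Option String)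
    (hra : d.contains "ra_kw" = true) (hdec : d.contains "dec_kw" = true)
    (hid : d.contains "id_kw" = true)
    (h1 : pvRel o1 X1 Y1) (h2 : pvRel o2 X2 Y2) (h3 : pvRel o3 X3 Y3) :
    pvApp "id_kw" X3 (pvApp "dec_kw" X2 (pvApp "ra_kw" X1
      (pvApp "id_kw" o3 (pvApp "dec_kw" o2 (pvApp "ra_kw" o1 d))))) =
    pvApp "id_kw" Y3 (pvApp "dec_kw" Y2 (pvApp "ra_kw" Y1 d)) := by
  have cra1 : (pvApp "ra_kw" o1 d).contains "ra_kw" = true := pv_contains_pvApp _ _ _ _ hra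
  have cdec1 : (pvApp "ra_kw" o1 d).contains "dec_kw" = true := pv_contains_pvApp _ _ _ _ hdec
  have cid1 : (pvApp "ra_kw" o1 d).contains "id_kw" = true := pv_contains_pvApp _ _ _ _ hid
  have cra2 : (pvApp "dec_kw" o2 (pvApp "ra_kw" o1 d)).contains "ra_kw" = true := pv_contains_pvApp _ _ _ _ cra1
  have cid2 : (pvApp "dec_kw" o2 (pvApp "ra_kw" o1 d)).contains "id_kw" = true := pv_contains_pvApp _ _ _ _ cid1
  rw [pv_pvApp_comm "ra_kw" "id_kw" X1 o3 _ (by decide) cra2 cid2]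
  rw [pv_pvApp_comm "ra_kw" "dec_kw" X1 o2 _ (by decide) cra1 cdec1]
  rw [pv_pvApp_absorb "ra_kw" o1 X1 Y1 d h1]
  have cdec3 : (pvApp "ra_kw" Y1 d).contains "dec_kw" = true := pv_contains_pvApp _ _ _ _ hdec
  have cid3 : (pvApp "ra_kw" Y1 d).contains "id_kw" = true := pv_contains_pvApp _ _ _ _ hid
  have cdec4 : (pvApp "dec_kw" o2 (pvApp "ra_kw" Y1 d)).contains "dec_kw" = true := pv_contains_pvApp _ _ _ _ cdec3
  have cid4 : (pvApp "dec_kw" o2 (pvApp "ra_kw" Y1 d)).contains "id_kw" = true := pv_contains_pvApp _ _ _ _ cid3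
  rw [pv_pvApp_comm "dec_kw" "id_kw" X2 o3 _ (by decide) cdec4 cid4]
  rw [pv_pvApp_absorb "dec_kw" o2 X2 Y2 _ h2]
  rw [pv_pvApp_absorb "id_kw" o3 X3 Y3 _ h3]

lemma pv_pvUpdA_eq (k m c v : String) (d : PySem.Dict String String) (h : d.get? k = some v) :
    pvUpdA k m c d = pvApp k (if m = v then some c else none) d := by
  unfold pvUpdA pvApp
  rw [h]
  by_cases hmv : m = v
  · simp [hmv]
  · simp [hmv]

-- A's whole loop equals three independent first-match renames of the initial values
lemma pv_main (suffix : String) (hsuf : suffix ≠ "") :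
    ∀ (cols : List String) (d : PySem.Dict String String) (va vb vi : String),
      d.get? "ra_kw" = some va → d.get? "dec_kw" = some vb → d.get? "id_kw" = some vi →
      cols.foldl (pvStepA suffix) d =
        pvApp "id_kw" (pvFind cols suffix vi)
          (pvApp "dec_kw" (pvFind cols suffix vb) (pvApp "ra_kw" (pvFind cols suffix va) d)) := by
  intro cols
  induction cols with
  | nil => intro d va vb vi _ _ _; simp [pvFind, pvApp]
  | cons c cs ih =>
    intro d va vb vi ha hb hi
    have hra : d.contains "ra_kw" = true := pv_get?_contains ha
    have hdec : d.contains "dec_kw" = true := pv_get?_contains hb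
    have hid : d.contains "id_kw" = true := pv_get?_contains hi
    by_cases he : PySem.Str.endswith c suffix = true
    · -- the column matches the suffix
      have hstep : pvStepA suffix d c =
          pvApp "id_kw" (if pvStrip c suffix = vi then some c else none)
            (pvApp "dec_kw" (if pvStrip c suffix = vb then some c else none)
              (pvApp "ra_kw" (if pvStrip c suffix = va then some c else none) d)) := by
        unfold pvStepA
        rw [if_pos he]
        rw [pv_pvUpdA_eq "ra_kw" (pvStrip c suffix) c va d ha]
        rw [pv_pvUpdA_eq "dec_kw" (pvStrip c suffix) c vb _
          (by rw [pv_get?_pvApp_of_ne _ _ _ _ (by decide)]; exact hb)]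
        rw [pv_pvUpdA_eq "id_kw" (pvStrip c suffix) c vi _ (by
          rw [pv_get?_pvApp_of_ne _ _ _ _ (by decide), pv_get?_pvApp_of_ne _ _ _ _ (by decide)]
          exact hi)]
      have hF : ∀ v : String, pvFind (c :: cs) suffix v =
          if pvStrip c suffix = v then some c else pvFind cs suffix v := by
        intro v
        by_cases hmv : pvStrip c suffix = v
        · rw [if_pos hmv]
          exact List.find?_cons_of_pos (by simp only [Bool.and_eq_true, beq_iff_eq]; exact ⟨he, hmv⟩)
        · rw [if_neg hmv]
          exact List.find?_cons_of_neg (by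
            simp only [Bool.and_eq_true, beq_iff_eq, not_and]
            intro _ hx; exact hmv hx)
      have hrel : ∀ v : String, pvRel (if pvStrip c suffix = v then some c else none)
          (pvFind cs suffix (if pvStrip c suffix = v then c else v))
          (pvFind (c :: cs) suffix v) := by
        intro v
        by_cases hmv : pvStrip c suffix = v
        · left
          refine ⟨c, by rw [if_pos hmv], ?_, by rw [hF v, if_pos hmv]⟩
          rw [if_pos hmv]
          exact pvFind_none cs suffix c hsuf he
        · right
          exact ⟨by rw [if_neg hmv], by rw [if_neg hmv, hF v, if_neg hmv]⟩
      -- values of the three keys after A's step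
      have hga : (pvStepA suffix d c).get? "ra_kw" = some (if pvStrip c suffix = va then c else va) := by
        rw [hstep, pv_get?_pvApp_of_ne _ _ _ _ (by decide), pv_get?_pvApp_of_ne _ _ _ _ (by decide),
          pv_get?_pvApp_self _ _ _ va ha]
        by_cases hmv : pvStrip c suffix = va <;> simp [hmv]
      have hgb : (pvStepA suffix d c).get? "dec_kw" = some (if pvStrip c suffix = vb then c else vb) := by
        rw [hstep, pv_get?_pvApp_of_ne _ _ _ _ (by decide),
          pv_get?_pvApp_self _ _ _ vb (by rw [pv_get?_pvApp_of_ne _ _ _ _ (by decide)]; exact hb)]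
        by_cases hmv : pvStrip c suffix = vb <;> simp [hmv]
      have hgi : (pvStepA suffix d c).get? "id_kw" = some (if pvStrip c suffix = vi then c else vi) := by
        rw [hstep, pv_get?_pvApp_self _ _ _ vi (by
          rw [pv_get?_pvApp_of_ne _ _ _ _ (by decide), pv_get?_pvApp_of_ne _ _ _ _ (by decide)]
          exact hi)]
        by_cases hmv : pvStrip c suffix = vi <;> simp [hmv]
      rw [List.foldl_cons, ih (pvStepA suffix d c) _ _ _ hga hgb hgi, hstep]
      exact pv_chain d _ _ _ _ _ _ _ _ _ hra hdec hid (hrel va) (hrel vb) (hrel vi)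
    · -- the column does not match: A skips it, and so does every find
      have hstep : pvStepA suffix d c = d := by unfold pvStepA; rw [if_neg he]
      have hF : ∀ v : String, pvFind (c :: cs) suffix v = pvFind cs suffix v := by
        intro v
        exact List.find?_cons_of_neg (by
          simp only [Bool.and_eq_true, not_and]
          intro hx; exact absurd hx he)
      rw [List.foldl_cons, hstep, ih d va vb vi ha hb hi, hF, hF, hF]

lemma pv_stepB_eq (cols : List String) (suffix k v : String) (d : PySem.Dict String String)
    (h : d.get? k = some v) : pvStepB cols suffix d k = pvApp k (pvFind cols suffix v) d := by
  unfold pvStepB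
  rw [h]
  cases hf : pvFind cols suffix v <;> simp [pvApp, hf]

-- with no matching column A's loop is the identity
lemma pv_foldA_id (suffix : String) (cols : List String)
    (h : ∀ c ∈ cols, ¬ PySem.Str.endswith c suffix = true) :
    ∀ d : PySem.Dict String String, cols.foldl (pvStepA suffix) d = d := by
  induction cols with
  | nil => intro d; rfl
  | cons c cs ih =>
    intro d
    rw [List.foldl_cons, show pvStepA suffix d c = d by
      unfold pvStepA; rw [if_neg (h c (List.mem_cons_self ..))]]
    exact ih (fun c hc => h c (List.mem_cons_of_mem _ hc)) d

-- with no matching column every find is none, so B's loop is the identity too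
lemma pv_foldB_id (cols : List String) (suffix : String)
    (h : ∀ c ∈ cols, ¬ PySem.Str.endswith c suffix = true) (d : PySem.Dict String String)
    (ks : List String) : ks.foldl (pvStepB cols suffix) d = d := by
  have hF : ∀ v : String, pvFind cols suffix v = none := by
    intro v
    rw [pvFind, List.find?_eq_none]
    intro c hc
    simp only [Bool.and_eq_true, not_and]
    intro hx; exact absurd hx (h c hc)
  induction ks generalizing d with
  | nil => rfl
  | cons k ks ih =>
    rw [List.foldl_cons, show pvStepB cols suffix d k = d by
      unfold pvStepB
      cases hg : d.get? k with
      | none => rfl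
      | some v => simp [hF v]]
    exact ih d

-- ===== VERDICT (by name: the statement is the Claim_ definition above) =====
theorem cmd_rename_kws_spec : Claim_equal_cmd_rename_kws := by
  intro cols md suffix _ hpre
  unfold Spec_cmd_rename_kws cmd_rename_kws cmd_rename_kws_alt
  by_cases hex : ∃ c ∈ cols, PySem.Str.endswith c suffix = true
  · obtain ⟨hsuf, h1, h2, h3⟩ := hpre hex
    obtain ⟨va, ha⟩ := Option.isSome_iff_exists.mp h1
    obtain ⟨vb, hb⟩ := Option.isSome_iff_exists.mp h2
    obtain ⟨vi, hi⟩ := Option.isSome_iff_exists.mp h3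
    congr 1
    rw [pv_main suffix hsuf cols (PySem.Dict.mk md) va vb vi ha hb hi]
    rw [show (["ra_kw", "dec_kw", "id_kw"] : List String).foldl (pvStepB cols suffix) (PySem.Dict.mk md) =
        pvStepB cols suffix (pvStepB cols suffix (pvStepB cols suffix (PySem.Dict.mk md) "ra_kw") "dec_kw") "id_kw" from rfl]
    rw [pv_stepB_eq cols suffix "ra_kw" va _ ha]
    rw [pv_stepB_eq cols suffix "dec_kw" vb _ (by
      rw [pv_get?_pvApp_of_ne _ _ _ _ (by decide)]; exact hb)]
    rw [pv_stepB_eq cols suffix "id_kw" vi _ (by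
      rw [pv_get?_pvApp_of_ne _ _ _ _ (by decide), pv_get?_pvApp_of_ne _ _ _ _ (by decide)]; exact hi)]
  · have hall : ∀ c ∈ cols, ¬ PySem.Str.endswith c suffix = true := by
      intro c hc hcontra; exact hex ⟨c, hc, hcontra⟩
    congr 1
    rw [pv_foldA_id suffix cols hall, pv_foldB_id cols suffix hall]
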